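-- pv_equiv track=rewrite | github.com/spraakbanken/parallel-corpus-py | src/parallel_corpus/text_token.py | token_at
-- ===== SOURCE A (Python) =====
-- from typing import TypedDict
--
-- class TokenAt(TypedDict):  # noqa: D101
--     token: int
--     offset: int
--
-- def token_at(tokens: list[str], character_offset: int) -> TokenAt:
--     """Return token at the given offset.
--
--     >>> abc = ['012', '3456', '789']
--     >>> token_at(abc, 0)
--     {'token': 0, 'offset': 0}
--
--     >>> token_at(abc, 2)
--     {'token': 0, 'offset': 2}
--
--     token_at(abc, 3) // => {token: 1, offset: 0}
--     token_at(abc, 6) // => {token: 1, offset: 3}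
--     token_at(abc, 7) // => {token: 2, offset: 0}
--     token_at(abc, 9) // => {token: 2, offset: 2}
--     token_at(abc, 10) // => {token: 3, offset: 0}
--     Utils.throws(() => token_at(abc, 11)) // => true
--     """
--     passed = 0
--     for i in range(len(tokens)):
--         w = len(tokens[i])
--         passed += w
--         if passed > character_offset:
--             return {"token": i, "offset": character_offset - passed + w}
--     if character_offset == len("".join(tokens)):
--         return {"token": len(tokens), "offset": 0}
--     raise IndexError(f"Out of bounds: tokens={tokens}, character_offset={character_offset}")
-- ===== SOURCE B (Python) =====
-- from itertools import accumulate
-- from bisect import bisect_right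
--
--
-- def token_at(tokens: list[str], character_offset: int):
--     prefix = list(accumulate(map(len, tokens)))
--     i = bisect_right(prefix, character_offset)
--     if i < len(tokens):
--         return {"token": i, "offset": character_offset - (prefix[i - 1] if i else 0)}
--     if character_offset == (prefix[-1] if prefix else 0):
--         return {"token": len(tokens), "offset": 0}
--     raise IndexError(f"Out of bounds: tokens={tokens}, character_offset={character_offset}")
-- ===== Notes on version B (the rewrite author's own statement) =====
-- stated objective: alternative
-- what changed: Replaces the running linear scan with a prefix-sum index built once by itertools.accumulate plus a bisect_right binary search to locate the containing token.
import Mathlib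
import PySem

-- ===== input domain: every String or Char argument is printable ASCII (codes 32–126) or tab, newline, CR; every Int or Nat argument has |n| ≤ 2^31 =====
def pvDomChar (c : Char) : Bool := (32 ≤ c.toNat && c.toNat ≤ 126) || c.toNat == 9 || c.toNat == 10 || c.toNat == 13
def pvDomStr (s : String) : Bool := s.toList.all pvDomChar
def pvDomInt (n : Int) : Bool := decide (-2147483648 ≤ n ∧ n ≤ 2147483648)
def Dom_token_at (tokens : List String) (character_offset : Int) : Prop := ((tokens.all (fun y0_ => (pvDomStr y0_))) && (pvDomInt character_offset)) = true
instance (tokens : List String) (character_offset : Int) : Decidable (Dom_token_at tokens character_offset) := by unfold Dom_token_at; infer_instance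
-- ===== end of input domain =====

-- B replaces A's running linear scan by a pfx-sum index searched with bisect_right (alternative
-- decomposition, same asymptotic cost); equivalence is about the return value on inputs where A returns.

-- ===== PORT A =====
-- the for-loop of A: walks the tokens keeping the running total `passed`;
-- `some (i, off)` = the early return, `none` = the loop fell through
def tokenAtLoop (character_offset : Int) : List String → Nat → Int → Option (Nat × Int)
  | [], _, _ => none
  | t :: rest, i, passed =>
      let w : Int := PySem.Str.len t
      let passed' := passed + w
      if passed' > character_offset then some (i, character_offset - passed' + w)
      else tokenAtLoop character_offset rest (i + 1) passed'

def token_at (tokens : List String) (character_offset : Int) : List (String × Int) :=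
  match tokenAtLoop character_offset tokens 0 0 with
  | some (i, off) => [("token", (i : Int)), ("offset", off)]
  | none =>
      if character_offset = PySem.Str.len (PySem.Str.join "" tokens) then
        [("token", (tokens.length : Int)), ("offset", 0)]
      else []  -- A raises IndexError here; excluded by Pre_token_at

-- ===== PORT B =====
-- itertools.accumulate over the lengths
def pvAccum (acc : Int) : List Int → List Int
  | [] => []
  | x :: xs => (acc + x) :: pvAccum (acc + x) xs

def token_at_alt (tokens : List String) (character_offset : Int) : List (String × Int) :=
  let pfx := pvAccum 0 (tokens.map (fun t => PySem.Str.len t))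
  -- bisect_right on the (sorted, nondecreasing) pfx list = number of elements ≤ character_offset
  let i := pfx.countP (fun p => decide (p ≤ character_offset))
  if i < tokens.length then
    [("token", (i : Int)),
     ("offset", character_offset - (if i = 0 then 0 else pfx.getD (i - 1) 0))]
  else if character_offset = pfx.getLast?.getD 0 then
    [("token", (tokens.length : Int)), ("offset", 0)]
  else []  -- B raises IndexError here; excluded by Pre_token_at

-- ===== PRECONDITION & SPEC =====
-- Pre_ excludes exactly the inputs on which A raises IndexError: an offset beyond the total
-- character count, and any nonzero offset on the empty token list.
def Pre_token_at (tokens : List String) (character_offset : Int) : Prop :=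
  character_offset ≤ (tokens.map (fun t => PySem.Str.len t)).sum ∧
    (tokens = [] → character_offset = 0)
instance (tokens : List String) (character_offset : Int) : Decidable (Pre_token_at tokens character_offset) := by unfold Pre_token_at; infer_instance

def pvWitness_token_at : List String × Int := (["012", "3456", "789"], 3)

def Spec_token_at (tokens : List String) (character_offset : Int) (out : List (String × Int)) : Prop := out = token_at_alt tokens character_offset
instance (tokens : List String) (character_offset : Int) (out : List (String × Int)) : Decidable (Spec_token_at tokens character_offset out) := by unfold Spec_token_at; infer_instance

-- ===== CLAIM (what is proved, stated in full; the proofs are below) =====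
def Claim_equal_token_at : Prop := ∀ (tokens : List String) (character_offset : Int), Dom_token_at tokens character_offset → Pre_token_at tokens character_offset → Spec_token_at tokens character_offset (token_at tokens character_offset)

-- ===== LEMMAS AND PROOFS =====

-- every element of pvAccum acc lens is ≥ acc when the lengths are nonnegative
theorem pvAccum_ge (lens : List Int) (acc : Int) (h : ∀ w ∈ lens, 0 ≤ w) :
    ∀ p ∈ pvAccum acc lens, acc ≤ p := by
  induction lens generalizing acc with
  | nil => intro p hp; simp [pvAccum] at hp
  | cons w ws ih =>
      intro p hp
      have hw : 0 ≤ w := h w (by simp)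
      simp only [pvAccum, List.mem_cons] at hp
      rcases hp with rfl | hp
      · omega
      · have := ih (acc + w) (fun x hx => h x (by simp [hx])) p hp
        omega

-- proof-side abbreviations for B's pfx list and bisect count
def pvPfx (acc : Int) (lens : List String) : List Int :=
  pvAccum acc (lens.map (fun t => PySem.Str.len t))

def pvCnt (co acc : Int) (lens : List String) : Nat :=
  (pvPfx acc lens).countP (fun p => decide (p ≤ co))

theorem pvCnt_cons (co acc : Int) (t : String) (ts : List String) :
    pvCnt co acc (t :: ts) =
      pvCnt co (acc + PySem.Str.len t) ts + (if acc + PySem.Str.len t ≤ co then 1 else 0) := by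
  simp [pvCnt, pvPfx, pvAccum, List.countP_cons]

-- characterisation of A's loop in terms of B's pfx-sum count
theorem tokenAtLoop_eq_count (co : Int) (lens : List String) :
    ∀ (i : Nat) (acc : Int),
    tokenAtLoop co lens i acc =
      (if pvCnt co acc lens < lens.length then
         some (i + pvCnt co acc lens,
               co - (if pvCnt co acc lens = 0 then acc else (pvPfx acc lens).getD (pvCnt co acc lens - 1) 0))
       else none) := by
  induction lens with
  | nil => intro i acc; simp [tokenAtLoop, pvCnt, pvPfx, pvAccum]
  | cons t ts ih =>
      intro i acc
      rw [pvCnt_cons]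
      simp only [tokenAtLoop, List.length_cons]
      by_cases hle : acc + PySem.Str.len t ≤ co
      · -- this token is passed: recurse
        rw [if_neg (show ¬ acc + PySem.Str.len t > co by omega),
            ih (i + 1) (acc + PySem.Str.len t), if_pos hle]
        by_cases hlt : pvCnt co (acc + PySem.Str.len t) ts < ts.length
        · rw [if_pos hlt,
              if_pos (show pvCnt co (acc + PySem.Str.len t) ts + 1 < ts.length + 1 by omega)]
          simp only [Option.some.injEq, Prod.mk.injEq]
          refine ⟨by omega, ?_⟩
          congr 1
          by_cases hc0 : pvCnt co (acc + PySem.Str.len t) ts = 0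
          · rw [hc0]
            simp [pvPfx, pvAccum]
          · rw [if_neg hc0,
                if_neg (show ¬ pvCnt co (acc + PySem.Str.len t) ts + 1 = 0 by omega)]
            rcases Nat.exists_eq_succ_of_ne_zero hc0 with ⟨k, hk⟩
            rw [hk]
            simp only [pvPfx, pvAccum, List.map_cons]
            rfl
        · rw [if_neg hlt,
              if_neg (show ¬ pvCnt co (acc + PySem.Str.len t) ts + 1 < ts.length + 1 by omega)]
      · -- early return at this token: every later pfx sum is also > co
        rw [if_pos (show acc + PySem.Str.len t > co by omega), if_neg hle]
        have hzero : pvCnt co (acc + PySem.Str.len t) ts = 0 := by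
          rw [pvCnt, List.countP_eq_zero]
          intro p hp
          have hnn : ∀ w ∈ ts.map (fun t => PySem.Str.len t), 0 ≤ w := by
            intro w hw
            simp only [List.mem_map] at hw
            obtain ⟨s, _, rfl⟩ := hw
            simp [PySem.Str.len_eq]
          have := pvAccum_ge _ _ hnn p hp
          simp only [decide_eq_true_eq]
          omega
        rw [hzero, if_pos (show 0 + 0 < ts.length + 1 by omega),
            if_pos (show (0 + 0 : Nat) = 0 by omega)]
        simp only [Option.some.injEq, Prod.mk.injEq]
        exact ⟨by omega, by ring⟩

-- the last pfx sum is the total length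
theorem pvAccum_getLast (lens : List Int) : ∀ acc : Int, lens ≠ [] →
    (pvAccum acc lens).getLast? = some (acc + lens.sum) := by
  induction lens with
  | nil => intro acc h; exact absurd rfl h
  | cons w ws ih =>
      intro acc _
      cases ws with
      | nil => simp [pvAccum]
      | cons v vs =>
          have h := ih (acc + w) (by simp)
          simp only [pvAccum] at h ⊢
          rw [List.getLast?_cons_cons, h]
          congr 1
          simp only [List.sum_cons]
          ring

-- length of a join on the empty separator is the sum of lengths
theorem chars_join_nil_length (xss : List (List Char)) :
    (PySem.Chars.join [] xss).length = (xss.map List.length).sum := by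
  induction xss with
  | nil => simp [PySem.Chars.join_nil]
  | cons p rest ih =>
      cases rest with
      | nil => simp [PySem.Chars.join_singleton]
      | cons q rest' =>
          rw [PySem.Chars.join_cons_cons]
          simp only [List.length_append, List.map_cons, List.sum_cons, List.length_nil] at ih ⊢
          omega

theorem join_len (tokens : List String) :
    PySem.Str.len (PySem.Str.join "" tokens) = (tokens.map (fun t => PySem.Str.len t)).sum := by
  rw [PySem.Str.len_eq, PySem.Str.toList_join]
  have h1 : ("" : String).toList = [] := rfl
  rw [h1, chars_join_nil_length]
  induction tokens with
  | nil => simp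
  | cons t ts ih =>
      simp only [List.map_cons, List.sum_cons, List.map_map]
      push_cast
      simp only [List.map_map] at ih
      rw [← ih]
      simp [PySem.Str.len_eq]



-- ===== VERDICT (by name: the statement is the Claim_ definition above) =====
theorem token_at_spec : Claim_equal_token_at := by
  intro tokens co _ _
  unfold Spec_token_at
  simp only [token_at, token_at_alt, tokenAtLoop_eq_count, pvCnt, pvPfx]
  set pfx := pvAccum 0 (tokens.map (fun t => PySem.Str.len t)) with hpfx
  set c := pfx.countP (fun p => decide (p ≤ co)) with hc
  by_cases hlt : c < tokens.length
  · rw [if_pos hlt, if_pos hlt]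
    simp
  · rw [if_neg hlt, if_neg hlt, join_len]
    have hlast : pfx.getLast?.getD 0 = (tokens.map (fun t => PySem.Str.len t)).sum := by
      cases tokens with
      | nil => simp [hpfx, pvAccum]
      | cons t ts =>
          have := pvAccum_getLast ((t :: ts).map (fun t => PySem.Str.len t)) 0 (by simp)
          rw [← hpfx] at this
          rw [this]
          simp
    rw [hlast]
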